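-- pv_equiv track=rewrite | github.com/b0ngokarl/meshtastic-telemetry-logger | chart_shared.py | ensure_color_cycle
-- ===== SOURCE A (Python) =====
-- from typing import Dict, Iterable, List, Optional
--
-- def ensure_color_cycle(colors: Iterable[str], count: int, fallback: List[str]) -> List[str]:
--     palette = [c.strip() for c in colors if c.strip()]
--     if not palette:
--         palette = list(fallback)
--     if count <= len(palette):
--         return palette[:count]
--     # Extend palette deterministically when more colors are needed.
--     extended = palette.copy()
--     idx = 0
--     while len(extended) < count:
--         extended.append(palette[idx % len(palette)])
--         idx += 1
--     return extended
-- ===== SOURCE B (Python) =====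
-- def ensure_color_cycle(colors, count, fallback):
--     palette = [c.strip() for c in colors if c.strip()] or list(fallback)
--     if count <= len(palette):
--         return palette[:count]
--     repeats = count // len(palette) + 1
--     return (palette * repeats)[:count]
-- ===== Notes on version B (the rewrite author's own statement) =====
-- stated objective: simpler
-- what changed: The element-by-element while loop that extends the palette is replaced by a closed-form construction: repeat the palette count//len(palette)+1 times with list multiplication and truncate to count.
import Mathlib
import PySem

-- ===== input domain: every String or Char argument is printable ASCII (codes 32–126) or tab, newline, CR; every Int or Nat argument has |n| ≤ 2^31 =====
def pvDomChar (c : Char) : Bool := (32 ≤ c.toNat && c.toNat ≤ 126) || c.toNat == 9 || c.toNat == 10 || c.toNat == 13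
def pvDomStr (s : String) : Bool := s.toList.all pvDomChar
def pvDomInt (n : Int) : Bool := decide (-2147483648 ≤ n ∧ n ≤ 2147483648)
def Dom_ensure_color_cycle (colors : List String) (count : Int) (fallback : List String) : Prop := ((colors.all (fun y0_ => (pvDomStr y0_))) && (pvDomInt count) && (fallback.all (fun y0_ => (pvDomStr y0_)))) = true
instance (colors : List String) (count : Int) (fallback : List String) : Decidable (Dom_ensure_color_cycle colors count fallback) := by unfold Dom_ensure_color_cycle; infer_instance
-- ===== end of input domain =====

-- B replaces A's element-by-element while loop with a closed-form list multiplication + slice (objective: simpler).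

-- ===== PORT A =====
-- the while loop: extended grows by one element per iteration until len(extended) >= count
-- fuel = number of remaining iterations (the while loop appends exactly one element per pass,
-- so (count - len(extended)).toNat passes remain); the while condition itself is still tested each pass
def ecLoop (palette : List String) (count : Int) (fuel : Nat) (extended : List String) (idx : Int) : List String :=
  match fuel with
  | 0 => extended
  | f + 1 =>
    if (extended.length : Int) < count then
      ecLoop palette count f
        (extended ++ [PySem.List.pyGetD palette (PySem.Int.mod idx (palette.length : Int)) ""])
        (idx + 1)
    else extended

def ensure_color_cycle (colors : List String) (count : Int) (fallback : List String) : List String :=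
  let palette0 := (colors.filter (fun c => PySem.Str.strip c ≠ "")).map (fun c => PySem.Str.strip c)
  let palette := if palette0 = [] then fallback else palette0
  if count ≤ (palette.length : Int) then PySem.List.slice palette none (some count)
  else ecLoop palette count (count - palette.length).toNat palette 0

-- ===== PORT B =====
def ensure_color_cycle_alt (colors : List String) (count : Int) (fallback : List String) : List String :=
  let p := (colors.filter (fun c => PySem.Str.strip c ≠ "")).map (fun c => PySem.Str.strip c)
  let palette := if p = [] then fallback else p
  if count ≤ (palette.length : Int) then PySem.List.slice palette none (some count)
  else
    let repeats := PySem.Int.floordiv count (palette.length : Int) + 1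
    PySem.List.slice (PySem.List.pyRepeat palette repeats) none (some count)

-- ===== PRECONDITION & SPEC =====
-- Pre_ excludes exactly the inputs where both Pythons raise ZeroDivisionError:
-- count > 0 while every color strips to "" and fallback is empty (empty palette).
def Pre_ensure_color_cycle (colors : List String) (count : Int) (fallback : List String) : Prop :=
  count ≤ 0 ∨ fallback ≠ [] ∨ colors.any (fun c => PySem.Str.strip c ≠ "") = true
instance (colors : List String) (count : Int) (fallback : List String) : Decidable (Pre_ensure_color_cycle colors count fallback) := by unfold Pre_ensure_color_cycle; infer_instance

def pvWitness_ensure_color_cycle : List String × Int × List String := (["red", " blue "], 5, ["#000"])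

def Spec_ensure_color_cycle (colors : List String) (count : Int) (fallback : List String) (out : List String) : Prop := out = ensure_color_cycle_alt colors count fallback
instance (colors : List String) (count : Int) (fallback : List String) (out : List String) : Decidable (Spec_ensure_color_cycle colors count fallback out) := by unfold Spec_ensure_color_cycle; infer_instance

-- ===== CLAIM (what is proved, stated in full; the proofs are below) =====
def Claim_equal_ensure_color_cycle : Prop := ∀ (colors : List String) (count : Int) (fallback : List String), Dom_ensure_color_cycle colors count fallback → Pre_ensure_color_cycle colors count fallback → Spec_ensure_color_cycle colors count fallback (ensure_color_cycle colors count fallback)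

-- ===== LEMMAS AND PROOFS =====

-- the cyclic element: palette[k % len]
def cyc (palette : List String) (k : Nat) : String := palette.getD (k % palette.length) ""

lemma cyc_add_len (palette : List String) (k : Nat) :
    cyc palette (palette.length + k) = cyc palette k := by
  simp [cyc, Nat.add_mod_left]

lemma ecLoop_eq (palette : List String) (count : Int) :
    ∀ (fuel : Nat) (ext : List String) (idx : Nat), fuel = (count - ext.length).toNat →
      ecLoop palette count fuel ext (idx : Int) =
        ext ++ (List.range fuel).map (fun j => cyc palette (idx + j)) := by
  intro fuel
  induction fuel with
  | zero =>
    intro ext idx h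
    simp [ecLoop]
  | succ k ih =>
    intro ext idx h
    have hlt : (ext.length : Int) < count := by omega
    rw [ecLoop]
    simp only [hlt, if_pos]
    have hx : PySem.List.pyGetD palette (PySem.Int.mod (idx : Int) (palette.length : Int)) ""
        = cyc palette idx := by
      rw [PySem.Int.mod_natCast]
      rw [PySem.List.pyGetD_natCast]
      rfl
    have hrec := ih (ext ++ [PySem.List.pyGetD palette (PySem.Int.mod (idx : Int) (palette.length : Int)) ""])
      (idx + 1) (by simp [List.length_append]; omega)
    have hcast : ((idx : Int) + 1) = ((idx + 1 : Nat) : Int) := by push_cast; ring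
    rw [hcast, hrec, hx]
    rw [List.append_assoc]
    congr 1
    rw [List.range_succ_eq_map]
    simp [List.map_map, Function.comp_def]
    intro a _
    congr 1
    omega

-- palette itself is the first len elements of the cycle
lemma palette_eq_range (palette : List String) :
    palette = (List.range palette.length).map (fun j => cyc palette j) := by
  apply List.ext_getElem
  · simp
  · intro i h1 h2
    simp [cyc, Nat.mod_eq_of_lt (by simpa using h2), List.getD_eq_getElem?_getD, List.getElem?_eq_getElem h1]

lemma flatten_replicate (palette : List String) (q : Nat) :
    (List.replicate q palette).flatten = (List.range (q * palette.length)).map (fun j => cyc palette j) := by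
  induction q with
  | zero => simp
  | succ k ih =>
    rw [List.replicate_succ, List.flatten_cons, ih]
    have : (k + 1) * palette.length = palette.length + k * palette.length := by ring
    rw [this, List.range_add, List.map_append]
    congr 1
    · exact palette_eq_range palette
    · rw [List.map_map]
      apply List.map_congr_left
      intro j _
      exact (cyc_add_len palette j).symm

lemma main_eq (palette : List String) (count : Int) (hp : palette ≠ [])
    (hlt : (palette.length : Int) < count) :
    ecLoop palette count (count - palette.length).toNat palette 0 =
      PySem.List.slice (PySem.List.pyRepeat palette (PySem.Int.floordiv count (palette.length : Int) + 1)) none (some count) := by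
  have hlen : 0 < palette.length := List.length_pos_iff.mpr hp
  have hlenZ : (0 : Int) < (palette.length : Int) := by exact_mod_cast hlen
  have h0 : ecLoop palette count (count - palette.length).toNat palette ((0 : Nat) : Int) =
      palette ++ (List.range (count - palette.length).toNat).map (fun j => cyc palette (0 + j)) :=
    ecLoop_eq palette count _ palette 0 rfl
  simp only [Nat.cast_zero, Nat.zero_add] at h0
  -- left side in canonical form
  have hA : ecLoop palette count (count - palette.length).toNat palette 0 = (List.range count.toNat).map (fun j => cyc palette j) := by
    rw [h0]
    have hsplit : count.toNat = palette.length + (count - palette.length).toNat := by omega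
    rw [hsplit, List.range_add, List.map_append, List.map_map]
    congr 1
    · exact palette_eq_range palette
    · apply List.map_congr_left
      intro j _
      exact (cyc_add_len palette j).symm
  -- right side
  have hq := PySem.Int.floordiv_mul_add_mod count (palette.length : Int)
  have hm0 := PySem.Int.mod_nonneg count hlenZ
  have hmlt := PySem.Int.mod_lt count hlenZ
  have hd0 : 0 ≤ PySem.Int.floordiv count (palette.length : Int) := by nlinarith
  have hr : (PySem.Int.floordiv count (palette.length : Int) + 1).toNat * palette.length ≥ count.toNat := by
    have : (PySem.Int.floordiv count (palette.length : Int) + 1) * (palette.length : Int) ≥ count + 1 := by nlinarith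
    have h2 : ((PySem.Int.floordiv count (palette.length : Int) + 1).toNat : Int) * (palette.length : Int) ≥ count + 1 := by
      rw [Int.toNat_of_nonneg (by omega)]; exact this
    have := h2
    zify
    omega
  rw [hA, PySem.List.slice_to _ (by omega : (0:Int) ≤ count)]
  unfold PySem.List.pyRepeat
  rw [flatten_replicate, ← List.map_take, List.take_range]
  congr 2
  omega

-- ===== VERDICT (by name: the statement is the Claim_ definition above) =====
theorem ensure_color_cycle_spec : Claim_equal_ensure_color_cycle := by
  intro colors count fallback _hdom hpre
  unfold Spec_ensure_color_cycle ensure_color_cycle ensure_color_cycle_alt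
  simp only []
  set p := (colors.filter (fun c => PySem.Str.strip c ≠ "")).map (fun c => PySem.Str.strip c) with hp
  set palette := if p = [] then fallback else p with hpal
  by_cases hle : count ≤ (palette.length : Int)
  · simp [hle]
  · have hlt : (palette.length : Int) < count := by omega
    have hne : palette ≠ [] := by
      rcases hpre with h | h | h
      · omega
      · intro hcon
        rw [hpal] at hcon
        by_cases hpe : p = []
        · rw [if_pos hpe] at hcon; exact h hcon
        · rw [if_neg hpe] at hcon; exact hpe hcon
      · intro hcon
        rw [hpal] at hcon
        rcases List.any_eq_true.mp h with ⟨c, hc, hcne⟩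
        have : PySem.Str.strip c ∈ p := by
          rw [hp]; exact List.mem_map_of_mem (List.mem_filter.mpr ⟨hc, by simpa using hcne⟩)
        by_cases hpe : p = []
        · simp [hpe] at this
        · rw [if_neg hpe] at hcon; exact hpe hcon
    simp only [hle, if_false]
    exact main_eq palette count hne hlt
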